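-- pv_equiv track=rewrite | github.com/wherby/code | algorithm/array/subarray-logTrick/AndOrToK/logTrickForGCD.py | maxGCDScore
-- ===== SOURCE A (Python) =====
-- from typing import List, Tuple, Optional
-- from collections import defaultdict,deque
-- from math import gcd
--
-- def maxGCDScore(nums: List[int], k: int) -> int:
--     lowbit_pos = defaultdict(list)
--
--     ans = 0
--     intervals = []  # 每个元素是一个三元组 (g, l, r)，表示区间 (l, r] 的 GCD 为 g
--     for i, x in enumerate(nums):
--         lowbit_pos[x & -x].append(i)
--
--         # 更新已有区间的 GCD
--         for p in intervals:
--             p[0] = gcd(p[0], x)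
--         # 添加新元素作为新区间
--         intervals.append([x, i - 1, i])
--
--         # 去重（合并 g 相同的区间）
--         idx = 1
--         for j in range(1, len(intervals)):
--             if intervals[j][0] != intervals[j - 1][0]:
--                 intervals[idx] = intervals[j]
--                 idx += 1
--             else:
--                 intervals[idx - 1][2] = intervals[j][2]
--         del intervals[idx:]
--
--         # 此时我们将区间 [0,i] 划分成了 len(intervals) 个左开右闭区间
--         # 对于 intervals 中的 (l,r]，对于任意 j∈(l,r]，gcd(区间[j,i]) 的计算结果均为 g
--         for g, l, r in intervals:
--             # 不做任何操作
--             ans = max(ans, g * (i - l))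
--             # 看看能否乘 2
--             pos = lowbit_pos[g & -g]
--             min_l = max(l, pos[-k - 1]) if len(pos) > k else l
--             if min_l < r:  # 可以乘 2
--                 ans = max(ans, g * 2 * (i - min_l))
--
--     return ans
-- ===== SOURCE B (Python) =====
-- from math import gcd
--
-- def maxGCDScore(nums, k):
--     # Plain double loop over all subarrays: for each start j extend right,
--     # keeping a running gcd (seeded with the first element) and a counter of
--     # lowest-set-bit values in the window; the gcd can be doubled iff the
--     # number of window elements sharing the gcd's lowbit is at most k.
--     ans = 0
--     for j in range(len(nums)):
--         g = nums[j]
--         cnt = {}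
--         for length, x in enumerate(nums[j:], 1):
--             if length > 1:
--                 g = gcd(g, x)
--             lb = x & -x
--             cnt[lb] = cnt.get(lb, 0) + 1
--             score = g * length
--             if cnt.get(g & -g, 0) <= k:
--                 score *= 2
--             ans = max(ans, score)
--     return ans
-- ===== Notes on version B (the rewrite author's own statement) =====
-- stated objective: simpler
-- what changed: Replaces the log-trick maintenance of gcd-constant intervals (with in-place dedup compaction and a global lowbit-position table indexed from the end) by a direct double loop over all subarrays that keeps a running gcd and a counter of lowbit values in the current window.
-- outside the precondition, e.g. on maxGCDScore([2, 4], -2): A raises IndexError, B returns 4; on maxGCDScore([15, 11, 13], -1): A returns 26, B returns 15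
import Mathlib
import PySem

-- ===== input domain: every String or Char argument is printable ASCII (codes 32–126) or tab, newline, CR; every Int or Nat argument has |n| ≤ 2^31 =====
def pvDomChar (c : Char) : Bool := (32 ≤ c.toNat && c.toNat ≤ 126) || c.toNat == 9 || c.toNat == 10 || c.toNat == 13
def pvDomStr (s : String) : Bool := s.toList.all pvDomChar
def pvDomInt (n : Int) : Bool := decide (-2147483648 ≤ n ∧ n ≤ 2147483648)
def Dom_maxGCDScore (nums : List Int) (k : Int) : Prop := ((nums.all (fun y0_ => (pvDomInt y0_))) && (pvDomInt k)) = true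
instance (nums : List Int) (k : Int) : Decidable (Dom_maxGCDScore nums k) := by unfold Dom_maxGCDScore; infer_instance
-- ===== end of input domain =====

set_option maxHeartbeats 1000000


-- B replaces A's gcd-interval log trick by a direct double loop over all subarrays
-- (running gcd plus a counter of lowbit values per window); same return value, not faster.

-- ===== PORT A =====
-- x & -x  (Python bitwise on possibly negative ints)
def pvLowbit (x : Int) : Int := PySem.Int.band x (-x)
-- math.gcd (always nonnegative)
def pvGcd (a b : Int) : Int := (Int.gcd a b : Int)

-- A's in-place dedup/compaction loop (state: the Python list and idx), then `del intervals[idx:]`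
def pvDedup (l : List (Int × Int × Int)) : List (Int × Int × Int) :=
  let r := (PySem.List.pyRange 1 (l.length : Int) 1).foldl
    (fun (st : List (Int × Int × Int) × Int) j =>
      let arr := st.1
      let idx := st.2
      let pj := (PySem.List.pyGet? arr j).getD (0, 0, 0)
      let pj1 := (PySem.List.pyGet? arr (j - 1)).getD (0, 0, 0)
      if pj.1 ≠ pj1.1 then
        (arr.set idx.toNat pj, idx + 1)
      else
        let q := (PySem.List.pyGet? arr (idx - 1)).getD (0, 0, 0)
        (arr.set (idx - 1).toNat (q.1, q.2.1, pj.2.2), idx))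
    (l, 1)
  r.1.take r.2.toNat

-- one iteration of A's outer `for i, x in enumerate(nums)` loop
def pvStepA (k : Int) (st : PySem.Dict Int (List Int) × Int × List (Int × Int × Int))
    (ix : Int × Int) : PySem.Dict Int (List Int) × Int × List (Int × Int × Int) :=
  let i := ix.1
  let x := ix.2
  let d := st.1.insert (pvLowbit x) (st.1.getD (pvLowbit x) [] ++ [i])
  let ivs := st.2.2.map (fun p => (pvGcd p.1 x, p.2.1, p.2.2))
  let ivs := ivs ++ [(x, i - 1, i)]
  let ivs := pvDedup ivs
  let ans := ivs.foldl (fun a p =>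
      let a := max a (p.1 * (i - p.2.1))
      let pos := d.getD (pvLowbit p.1) []
      let min_l := if (pos.length : Int) > k then max p.2.1 ((PySem.List.pyGet? pos (-k - 1)).getD 0) else p.2.1
      if min_l < p.2.2 then max a (p.1 * 2 * (i - min_l)) else a) st.2.1
  (d, ans, ivs)

def maxGCDScore (nums : List Int) (k : Int) : Int :=
  ((PySem.List.enumerate nums 0).foldl (pvStepA k) (PySem.Dict.empty, 0, [])).2.1

-- ===== PORT B =====
-- one iteration of B's inner loop; state: (ans, g, cnt, length)
def pvStepB (k : Int) (st : Int × Int × PySem.Dict Int Int × Int) (x : Int) :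
    Int × Int × PySem.Dict Int Int × Int :=
  let ans := st.1
  let len := st.2.2.2 + 1
  let g := if len > 1 then pvGcd st.2.1 x else st.2.1
  let lb := pvLowbit x
  let cnt := st.2.2.1.insert lb (st.2.2.1.getD lb 0 + 1)
  let score := g * len
  let score := if cnt.getD (pvLowbit g) 0 ≤ k then score * 2 else score
  (max ans score, g, cnt, len)

def maxGCDScore_alt (nums : List Int) (k : Int) : Int :=
  (List.range nums.length).foldl (fun ans j =>
    ((nums.drop j).foldl (pvStepB k) (ans, nums.getD j 0, PySem.Dict.empty, 0)).1) 0

-- ===== PRECONDITION & SPEC =====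
-- Pre_ excludes negative k (a negative doubling budget is outside the task's natural
-- domain): A then indexes the lowbit-position lists from the FRONT via pos[-k-1],
-- raising IndexError for most negative k and doubling accidentally for k = -1.
def Pre_maxGCDScore (nums : List Int) (k : Int) : Prop := 0 ≤ k
instance (nums : List Int) (k : Int) : Decidable (Pre_maxGCDScore nums k) := by
  unfold Pre_maxGCDScore; infer_instance

def pvWitness_maxGCDScore : List Int × Int := ([6, 4, 3], 1)

def Spec_maxGCDScore (nums : List Int) (k : Int) (out : Int) : Prop := out = maxGCDScore_alt nums k
instance (nums : List Int) (k : Int) (out : Int) : Decidable (Spec_maxGCDScore nums k out) := by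
  unfold Spec_maxGCDScore; infer_instance

-- ===== CLAIM (what is proved, stated in full; the proofs are below) =====
def Claim_equal_maxGCDScore : Prop := ∀ (nums : List Int) (k : Int), Dom_maxGCDScore nums k → Pre_maxGCDScore nums k → Spec_maxGCDScore nums k (maxGCDScore nums k)

-- ===== LEMMAS AND PROOFS =====

-- The common yardstick: gcd of a window (seeded with its first element), the score of a
-- window, and "r bounds the score of every window".
def pvGOf : List Int → Int
  | [] => 0
  | x :: t => t.foldl pvGcd x

def pvCrit (b y : Int) : Bool := pvLowbit y == b

def pvScoreW (k : Int) (w : List Int) : Int :=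
  if ((w.countP (pvCrit (pvLowbit (pvGOf w)))) : Int) ≤ k
  then (pvGOf w * (w.length : Int)) * 2 else pvGOf w * (w.length : Int)

def pvWin (nums : List Int) (j i : Nat) : List Int := (nums.drop j).take (i + 1 - j)

def pvScore (nums : List Int) (k : Int) (j i : Nat) : Int := pvScoreW k (pvWin nums j i)

def pvUB (nums : List Int) (k r : Int) : Prop :=
  0 ≤ r ∧ ∀ j i : Nat, j ≤ i → i < nums.length → pvScore nums k j i ≤ r

-- ---------- generic window facts ----------

theorem pvWin_len (nums : List Int) (j i : Nat) (hji : j ≤ i) (hi : i < nums.length) :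
    (pvWin nums j i).length = i + 1 - j := by
  simp [pvWin]; omega

theorem pvWin_ne_nil (nums : List Int) (j i : Nat) (hji : j ≤ i) (hi : i < nums.length) :
    pvWin nums j i ≠ [] := by
  have h := pvWin_len nums j i hji hi
  intro hc; rw [hc] at h; simp at h; omega

theorem pvGOf_append (w : List Int) (x : Int) (hw : w ≠ []) :
    pvGOf (w ++ [x]) = pvGcd (pvGOf w) x := by
  cases w with
  | nil => simp at hw
  | cons a t => simp [pvGOf, List.foldl_append]

theorem pvWin_succ (nums : List Int) (j i : Nat) (hji : j ≤ i) (hi : i + 1 < nums.length) :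
    pvWin nums j (i + 1) = pvWin nums j i ++ [nums.getD (i + 1) 0] := by
  unfold pvWin
  rw [show i + 1 + 1 - j = (i + 1 - j) + 1 by omega, List.take_add_one]
  congr 1
  rw [List.getElem?_drop, show j + (i + 1 - j) = i + 1 by omega,
    List.getElem?_eq_getElem hi]
  simp [List.getD_eq_getElem?_getD, List.getElem?_eq_getElem hi]

theorem pvWin_single (nums : List Int) (i : Nat) (hi : i < nums.length) :
    pvWin nums i i = [nums.getD i 0] := by
  unfold pvWin
  rw [show i + 1 - i = 0 + 1 by omega, List.take_add_one]
  rw [List.getElem?_drop, show i + 0 = i by omega, List.getElem?_eq_getElem hi]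
  simp [List.getD_eq_getElem?_getD, List.getElem?_eq_getElem hi]

-- ---------- B side ----------

def pvOuterF (nums : List Int) (k : Int) (ans : Int) (j : Nat) : Int :=
  ((nums.drop j).foldl (pvStepB k) (ans, nums.getD j 0, PySem.Dict.empty, 0)).1

theorem pvAlt_eq (nums : List Int) (k : Int) :
    maxGCDScore_alt nums k = (List.range nums.length).foldl (pvOuterF nums k) 0 := rfl

def pvPrefScores (k : Int) : List Int → List Int → List Int
  | _, [] => []
  | w, x :: t => pvScoreW k (w ++ [x]) :: pvPrefScores k (w ++ [x]) t

theorem pvCnt_step (w : List Int) (x : Int) (cnt : PySem.Dict Int Int)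
    (h : ∀ b, cnt.getD b 0 = ((w.countP (pvCrit b)) : Int)) :
    ∀ b, (cnt.insert (pvLowbit x) (cnt.getD (pvLowbit x) 0 + 1)).getD b 0
        = (((w ++ [x]).countP (pvCrit b)) : Int) := by
  intro b
  rw [PySem.Dict.getD_insert, List.countP_append]
  by_cases hb : b = pvLowbit x
  · rw [if_pos hb, h (pvLowbit x), hb]
    have h1 : [x].countP (pvCrit (pvLowbit x)) = 1 := by simp [pvCrit]
    rw [h1]; push_cast; ring
  · rw [if_neg hb, h b]
    have h1 : [x].countP (pvCrit b) = 0 := by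
      simp [pvCrit]; exact fun hc => absurd hc.symm hb
    rw [h1]; push_cast; ring

theorem pvInner_run (k : Int) :
    ∀ (l w : List Int) (ans : Int) (cnt : PySem.Dict Int Int), w ≠ [] →
    (∀ b, cnt.getD b 0 = ((w.countP (pvCrit b)) : Int)) →
    (l.foldl (pvStepB k) (ans, pvGOf w, cnt, (w.length : Int))).1
      = (pvPrefScores k w l).foldl max ans := by
  intro l
  induction l with
  | nil => intro w ans cnt _ _; simp [pvPrefScores]
  | cons x t ih =>
    intro w ans cnt hw hcnt
    have hlen : ((w.length : Int) + 1) > 1 := by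
      have := List.length_pos_iff.mpr hw
      omega
    have hstep : pvStepB k (ans, pvGOf w, cnt, (w.length : Int)) x
        = (max ans (pvScoreW k (w ++ [x])), pvGOf (w ++ [x]),
           cnt.insert (pvLowbit x) (cnt.getD (pvLowbit x) 0 + 1), ((w ++ [x]).length : Int)) := by
      simp only [pvStepB]
      rw [if_pos hlen, ← pvGOf_append w x hw]
      rw [pvCnt_step w x cnt hcnt (pvLowbit (pvGOf (w ++ [x])))]
      simp only [pvScoreW, List.length_append, List.length_cons, List.length_nil]
      push_cast
      rfl
    simp only [List.foldl_cons, hstep, pvPrefScores]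
    rw [ih (w ++ [x]) (max ans (pvScoreW k (w ++ [x]))) _ (by simp) (pvCnt_step w x cnt hcnt)]

theorem pvInner_full (nums : List Int) (k : Int) (j : Nat) (hj : j < nums.length) (ans : Int) :
    pvOuterF nums k ans j = (pvPrefScores k [] (nums.drop j)).foldl max ans := by
  unfold pvOuterF
  have hd : nums.drop j = nums[j] :: nums.drop (j + 1) := List.drop_eq_getElem_cons hj
  have hg : nums.getD j 0 = nums[j] := by
    simp [List.getD_eq_getElem?_getD, List.getElem?_eq_getElem hj]
  have hcnt0 : ∀ b : Int, (PySem.Dict.empty : PySem.Dict Int Int).getD b 0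
      = ((([] : List Int).countP (pvCrit b)) : Int) := by
    intro b; simp [PySem.Dict.getD_empty]
  have hcnt1 : ∀ b, ((PySem.Dict.empty : PySem.Dict Int Int).insert (pvLowbit nums[j])
        ((PySem.Dict.empty : PySem.Dict Int Int).getD (pvLowbit nums[j]) 0 + 1)).getD b 0
      = ((([nums[j]] : List Int).countP (pvCrit b)) : Int) := by
    intro b
    simpa using pvCnt_step [] nums[j] PySem.Dict.empty hcnt0 b
  have hstep : pvStepB k (ans, nums.getD j 0, PySem.Dict.empty, 0) nums[j]
      = (max ans (pvScoreW k [nums[j]]), pvGOf [nums[j]],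
         (PySem.Dict.empty : PySem.Dict Int Int).insert (pvLowbit nums[j])
           ((PySem.Dict.empty : PySem.Dict Int Int).getD (pvLowbit nums[j]) 0 + 1),
         (([nums[j]] : List Int).length : Int)) := by
    simp only [pvStepB]
    rw [if_neg (show ¬((0 : Int) + 1 > 1) by norm_num), hg]
    rw [hcnt1 (pvLowbit nums[j])]
    simp only [pvScoreW]
    norm_num [pvGOf]
  rw [hd]
  simp only [List.foldl_cons]
  rw [hstep]
  rw [pvInner_run k (nums.drop (j + 1)) [nums[j]] (max ans (pvScoreW k [nums[j]])) _
    (by simp) hcnt1]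
  simp [pvPrefScores]

theorem pvPref_mem (k : Int) : ∀ (l w : List Int) (s : Int),
    s ∈ pvPrefScores k w l → ∃ t : Nat, t < l.length ∧ s = pvScoreW k (w ++ l.take (t + 1)) := by
  intro l
  induction l with
  | nil => intro w s hs; simp [pvPrefScores] at hs
  | cons x t ih =>
    intro w s hs
    simp only [pvPrefScores, List.mem_cons] at hs
    rcases hs with hs | hs
    · exact ⟨0, by simp, by simpa using hs⟩
    · obtain ⟨t', ht', rfl⟩ := ih (w ++ [x]) s hs
      exact ⟨t' + 1, by simp; omega, by simp [List.take_cons, List.append_assoc]⟩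

theorem pvPref_mem_of (k : Int) : ∀ (l w : List Int) (t : Nat), t < l.length →
    pvScoreW k (w ++ l.take (t + 1)) ∈ pvPrefScores k w l := by
  intro l
  induction l with
  | nil => intro w t ht; simp at ht
  | cons x xs ih =>
    intro w t ht
    cases t with
    | zero => simp [pvPrefScores]
    | succ t' =>
      simp only [pvPrefScores, List.mem_cons]
      right
      have := ih (w ++ [x]) t' (by simp at ht ⊢; omega)
      simpa [List.take_cons, List.append_assoc] using this

theorem pvWin_as_take (nums : List Int) (j t : Nat) :
    (nums.drop j).take (t + 1) = pvWin nums j (j + t) := by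
  unfold pvWin
  congr 1
  omega

theorem pvFoldMax_le {l : List Int} {a r : Int} (ha : a ≤ r) (h : ∀ s ∈ l, s ≤ r) :
    l.foldl max a ≤ r := by
  induction l generalizing a with
  | nil => exact ha
  | cons x t ih =>
    exact ih (by simp only [max_le_iff]; exact ⟨ha, h x (by simp)⟩)
      (fun s hs => h s (by simp [hs]))

theorem pvOuter_mono (nums : List Int) (k : Int) :
    ∀ (J : List Nat) (a : Int), (∀ j ∈ J, j < nums.length) → a ≤ J.foldl (pvOuterF nums k) a := by
  intro J
  induction J with
  | nil => intro a _; simp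
  | cons j J' ih =>
    intro a hJ
    have h1 : a ≤ pvOuterF nums k a j := by
      rw [pvInner_full nums k j (hJ j (by simp)) a]
      exact (PySem.List.le_foldl_max _ _).1
    calc a ≤ pvOuterF nums k a j := h1
      _ ≤ _ := ih _ (fun j' hj' => hJ j' (by simp [hj']))

theorem pvOuter_ge (nums : List Int) (k : Int) :
    ∀ (J : List Nat) (a s : Int) (j : Nat), (∀ j' ∈ J, j' < nums.length) → j ∈ J →
    s ∈ pvPrefScores k [] (nums.drop j) → s ≤ J.foldl (pvOuterF nums k) a := by
  intro J
  induction J with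
  | nil => intro a s j _ hj; simp at hj
  | cons j' J' ih =>
    intro a s j hJ hj hs
    simp only [List.mem_cons] at hj
    simp only [List.foldl_cons]
    rcases hj with rfl | hj
    · have h1 : s ≤ pvOuterF nums k a j := by
        rw [pvInner_full nums k j (hJ j (by simp)) a]
        exact (PySem.List.le_foldl_max _ _).2 s hs
      calc s ≤ pvOuterF nums k a j := h1
        _ ≤ _ := pvOuter_mono nums k J' _ (fun j'' hj'' => hJ j'' (by simp [hj'']))
    · exact ih _ s j (fun j'' hj'' => hJ j'' (by simp [hj''])) hj hs

theorem pvB_bound (nums : List Int) (k : Int) : pvUB nums k (maxGCDScore_alt nums k) := by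
  rw [pvAlt_eq]
  constructor
  · exact pvOuter_mono nums k (List.range nums.length) 0 (by simp)
  · intro j i hji hi
    have ht : i - j < (nums.drop j).length := by simp [List.length_drop]; omega
    have hmem := pvPref_mem_of k (nums.drop j) [] (i - j) ht
    rw [pvWin_as_take nums j (i - j), show j + (i - j) = i by omega] at hmem
    simp only [List.nil_append] at hmem
    exact pvOuter_ge nums k (List.range nums.length) 0 _ j (by simp)
      (List.mem_range.mpr (by omega)) hmem

theorem pvB_least (nums : List Int) (k r : Int) (h : pvUB nums k r) : maxGCDScore_alt nums k ≤ r := by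
  rw [pvAlt_eq]
  obtain ⟨hr0, hrs⟩ := h
  have main : ∀ (J : List Nat) (a : Int), (∀ j ∈ J, j < nums.length) → a ≤ r →
      J.foldl (pvOuterF nums k) a ≤ r := by
    intro J
    induction J with
    | nil => intro a _ ha; simpa using ha
    | cons j J' ih =>
      intro a hJ ha
      simp only [List.foldl_cons]
      refine ih _ (fun j' hj' => hJ j' (by simp [hj'])) ?_
      rw [pvInner_full nums k j (hJ j (by simp)) a]
      refine pvFoldMax_le ha ?_
      intro s hs
      obtain ⟨t, ht, rfl⟩ := pvPref_mem k (nums.drop j) [] s hs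
      rw [pvWin_as_take nums j t]
      simp only [List.nil_append]
      have hjt : j + t < nums.length := by simp [List.length_drop] at ht; omega
      exact hrs j (j + t) (by omega) hjt
  exact main _ 0 (by simp) hr0

-- ---------- A side: shapes, runs, dict, dedup ----------

def pvShape : List (Int × Int × Int) → Int → Int → Prop
  | [], lo, hi => lo = hi
  | p :: t, lo, hi => p.2.1 = lo ∧ lo < p.2.2 ∧ pvShape t p.2.2 hi

def pvConstV (V : Int → Int) (ivs : List (Int × Int × Int)) : Prop :=
  ∀ p ∈ ivs, ∀ j : Int, p.2.1 < j → j ≤ p.2.2 → V j = p.1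

def pvPosL (nums : List Int) (m : Nat) (b : Int) : List Int :=
  List.map (fun q : Nat => (q : Int)) ((List.range m).filter (fun q => pvCrit b (nums.getD q 0)))

-- the run-length-merge step A's dedup performs per element
def pvRleStep (acc : List (Int × Int × Int)) (e : Int × Int × Int) : List (Int × Int × Int) :=
  match acc.getLast? with
  | none => [e]
  | some q => if e.1 = q.1 then acc.dropLast ++ [(q.1, q.2.1, e.2.2)] else acc ++ [e]

theorem pvRleStep_last (acc : List (Int × Int × Int)) (e : Int × Int × Int) :
    (pvRleStep acc e).getLast?.map (·.1) = some e.1 := by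
  unfold pvRleStep
  cases acc.getLast? with
  | none => simp
  | some q =>
    dsimp only
    split
    · next h => rw [List.getLast?_concat]; simp [h]
    · rw [List.getLast?_concat]; simp

theorem pvRle_last_fst (s : List (Int × Int × Int)) (hs : s ≠ []) :
    ((s.foldl pvRleStep []).getLast?).map (·.1) = s.getLast?.map (·.1) := by
  induction s using List.reverseRecOn with
  | nil => simp at hs
  | append_singleton s' e _ =>
    rw [List.foldl_append, List.getLast?_concat]
    simp only [List.foldl_cons, List.foldl_nil]
    rw [pvRleStep_last]
    rfl

theorem pvSet_mid (xs ys : List (Int × Int × Int)) (y v : Int × Int × Int) :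
    (xs ++ y :: ys).set xs.length v = (xs ++ [v]) ++ ys := by
  induction xs with
  | nil => simp
  | cons a t ih => simp [List.set_cons_succ, ih]

theorem pvSet_last (xs ys : List (Int × Int × Int)) (q v : Int × Int × Int) :
    ((xs ++ [q]) ++ ys).set xs.length v = (xs ++ [v]) ++ ys := by
  have h := pvSet_mid xs ys q v
  simpa using h

theorem pvTake_concat (l : List (Int × Int × Int)) (n : Nat) (hn : n < l.length) :
    l.take (n + 1) = l.take n ++ [l[n]] := by
  rw [List.take_add_one, List.getElem?_eq_getElem hn]
  rfl

theorem pvDedup_eq_rle (l : List (Int × Int × Int)) :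
    pvDedup l = l.foldl pvRleStep [] := by
  rcases hl0 : l with _ | ⟨p0, t0⟩
  · rfl
  rw [← hl0]
  have hlne : l ≠ [] := by rw [hl0]; simp
  have hL1 : 1 ≤ l.length := by rw [hl0]; simp
  have main : ∀ (n : Nat) (jv : Int), 1 ≤ jv → jv + n = (l.length : Int) →
      ∀ (arr : List (Int × Int × Int)) (idx : Int),
      arr = ((l.take jv.toNat).foldl pvRleStep []) ++ l.drop ((l.take jv.toNat).foldl pvRleStep []).length →
      idx = (((l.take jv.toNat).foldl pvRleStep []).length : Int) →
      ((l.take jv.toNat).foldl pvRleStep []).length ≤ jv.toNat →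
      1 ≤ ((l.take jv.toNat).foldl pvRleStep []).length →
      ((PySem.List.pyRange jv (l.length : Int) 1).foldl
        (fun (st : List (Int × Int × Int) × Int) j =>
          let arr := st.1
          let idx := st.2
          let pj := (PySem.List.pyGet? arr j).getD (0, 0, 0)
          let pj1 := (PySem.List.pyGet? arr (j - 1)).getD (0, 0, 0)
          if pj.1 ≠ pj1.1 then
            (arr.set idx.toNat pj, idx + 1)
          else
            let q := (PySem.List.pyGet? arr (idx - 1)).getD (0, 0, 0)
            (arr.set (idx - 1).toNat (q.1, q.2.1, pj.2.2), idx))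
        (arr, idx))
      = ((l.foldl pvRleStep []) ++ l.drop ((l.foldl pvRleStep []).length),
         (((l.foldl pvRleStep []).length : Int))) := by
    intro n
    induction n with
    | zero =>
      intro jv h1 hsum arr idx harr hidx _ _
      have hjv : jv = (l.length : Int) := by omega
      subst hjv
      rw [PySem.List.pyRange_one_eq_nil (le_refl _)]
      simp only [List.foldl_nil]
      rw [show ((l.length : Int)).toNat = l.length from by omega, List.take_length] at harr hidx
      rw [harr, hidx]
    | succ n ihn =>
      intro jv h1 hsum arr idx harr hidx hCle hC1
      set C := (l.take jv.toNat).foldl pvRleStep [] with hCdef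
      have hjvlt : jv < (l.length : Int) := by omega
      have hjvN : jv.toNat < l.length := by omega
      have hClen : C.length ≤ l.length := by omega
      have harrlen : arr.length = l.length := by
        rw [harr]
        simp only [List.length_append, List.length_drop]
        omega
      have hgetj : PySem.List.pyGet? arr jv = some (l[jv.toNat]'hjvN) := by
        rw [PySem.List.pyGet?_of_nonneg arr (show (0:Int) ≤ jv by omega)]
        have h1' : arr[jv.toNat]? = l[jv.toNat]? := by
          rw [harr, List.getElem?_append_right (by omega), List.getElem?_drop]
          congr 1
          omega
        rw [h1', List.getElem?_eq_getElem hjvN]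
      have hCne : C ≠ [] := by
        intro hc; rw [hc] at hC1; simp at hC1
      have htake_ne : l.take jv.toNat ≠ [] := by
        have hlt : (l.take jv.toNat).length = jv.toNat := by simp; omega
        intro hc; rw [hc] at hlt; simp at hlt; omega
      have hlastfst : (C.getLast?).map (·.1) = some (l[jv.toNat - 1]'(by omega)).1 := by
        rw [hCdef, pvRle_last_fst _ htake_ne]
        have htk : l.take jv.toNat = l.take (jv.toNat - 1) ++ [l[jv.toNat - 1]'(by omega)] := by
          rw [← pvTake_concat l (jv.toNat - 1) (by omega), show jv.toNat - 1 + 1 = jv.toNat by omega]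
        rw [htk, List.getLast?_concat]
        rfl
      have hCgetLast : C.getLast? = some (C.getLast hCne) := List.getLast?_eq_some_getLast hCne
      have hlast1 : (C.getLast hCne).1 = (l[jv.toNat - 1]'(by omega)).1 := by
        rw [hCgetLast] at hlastfst
        simpa using hlastfst
      have hgetj1 : ((PySem.List.pyGet? arr (jv - 1)).getD (0, 0, 0)).1 = (l[jv.toNat - 1]'(by omega)).1 := by
        rw [PySem.List.pyGet?_of_nonneg arr (show (0:Int) ≤ jv - 1 by omega)]
        rw [show (jv - 1).toNat = jv.toNat - 1 from by omega]
        by_cases hc : C.length ≤ jv.toNat - 1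
        · have h1' : arr[jv.toNat - 1]? = l[jv.toNat - 1]? := by
            rw [harr, List.getElem?_append_right (by omega), List.getElem?_drop]
            congr 1
            omega
          rw [h1', List.getElem?_eq_getElem (show jv.toNat - 1 < l.length by omega)]
          rfl
        · have hcl : jv.toNat - 1 < C.length := by omega
          have h1' : arr[jv.toNat - 1]? = C[jv.toNat - 1]? := by
            rw [harr, List.getElem?_append_left hcl]
          rw [h1', List.getElem?_eq_getElem hcl]
          simp only [Option.getD_some]
          have h2' : C[jv.toNat - 1]'hcl = C.getLast hCne := by
            rw [List.getLast_eq_getElem]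
            congr 1
            omega
          rw [h2', hlast1]
      have hsnoc : (l.take (jv.toNat + 1)).foldl pvRleStep [] = pvRleStep C (l[jv.toNat]'hjvN) := by
        rw [pvTake_concat l jv.toNat hjvN, List.foldl_append]
        simp only [List.foldl_cons, List.foldl_nil]
        rw [hCdef]
      rw [PySem.List.pyRange_one_cons hjvlt]
      simp only [List.foldl_cons]
      rw [hgetj]
      simp only [Option.getD_some]
      by_cases hne : (l[jv.toNat]'hjvN).1 ≠ (l[jv.toNat - 1]'(by omega)).1
      · -- new run
        rw [if_pos (by rw [hgetj1]; exact hne)]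
        have hbr : pvRleStep C (l[jv.toNat]'hjvN) = C ++ [l[jv.toNat]'hjvN] := by
          unfold pvRleStep
          rw [hCgetLast]
          dsimp only
          rw [if_neg (by rw [hlast1]; exact hne)]
        have harr2 : arr.set idx.toNat (l[jv.toNat]'hjvN)
            = (C ++ [l[jv.toNat]'hjvN]) ++ l.drop (C.length + 1) := by
          obtain ⟨y, hy⟩ : ∃ y, l.drop C.length = y :: l.drop (C.length + 1) :=
            ⟨l[C.length]'(by omega), List.drop_eq_getElem_cons (by omega)⟩
          rw [harr, hidx, show ((C.length : Int)).toNat = C.length from by omega, hy,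
            pvSet_mid]
        have hres := ihn (jv + 1) (by omega) (by omega)
          (arr.set idx.toNat (l[jv.toNat]'hjvN)) (idx + 1)
          (by rw [show (jv + 1).toNat = jv.toNat + 1 from by omega, hsnoc, hbr, harr2]
              simp [List.length_append])
          (by rw [show (jv + 1).toNat = jv.toNat + 1 from by omega, hsnoc, hbr, hidx]
              simp [List.length_append])
          (by rw [show (jv + 1).toNat = jv.toNat + 1 from by omega, hsnoc, hbr]
              simp only [List.length_append, List.length_cons, List.length_nil]
              omega)
          (by rw [show (jv + 1).toNat = jv.toNat + 1 from by omega, hsnoc, hbr]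
              simp [List.length_append])
        exact hres
      · -- merge into last run
        push_neg at hne
        rw [if_neg (by rw [hgetj1]; simpa using hne)]
        have hbr : pvRleStep C (l[jv.toNat]'hjvN)
            = C.dropLast ++ [((C.getLast hCne).1, (C.getLast hCne).2.1, (l[jv.toNat]'hjvN).2.2)] := by
          unfold pvRleStep
          rw [hCgetLast]
          dsimp only
          rw [if_pos (by rw [hlast1]; exact hne)]
        have hq : (PySem.List.pyGet? arr (idx - 1)).getD (0, 0, 0) = C.getLast hCne := by
          rw [hidx, PySem.List.pyGet?_of_nonneg arr (show (0:Int) ≤ (C.length : Int) - 1 by omega)]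
          rw [show (((C.length : Int)) - 1).toNat = C.length - 1 from by omega]
          have hcl : C.length - 1 < C.length := by omega
          have h1' : arr[C.length - 1]? = C[C.length - 1]? := by
            rw [harr, List.getElem?_append_left hcl]
          rw [h1', List.getElem?_eq_getElem hcl]
          simp only [Option.getD_some]
          rw [List.getLast_eq_getElem]
        rw [hq]
        have harr2 : arr.set (idx - 1).toNat
              ((C.getLast hCne).1, (C.getLast hCne).2.1, (l[jv.toNat]'hjvN).2.2)
            = (C.dropLast ++ [((C.getLast hCne).1, (C.getLast hCne).2.1, (l[jv.toNat]'hjvN).2.2)])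
              ++ l.drop C.length := by
          have h' := pvSet_last C.dropLast (l.drop C.length) (C.getLast hCne)
            ((C.getLast hCne).1, (C.getLast hCne).2.1, (l[jv.toNat]'hjvN).2.2)
          rw [List.dropLast_append_getLast hCne] at h'
          rw [hidx, show (((C.length : Int)) - 1).toNat = C.dropLast.length from by
            simp only [List.length_dropLast]; omega]
          rw [harr, h']
        have hlen2 : (C.dropLast ++ [((C.getLast hCne).1, (C.getLast hCne).2.1, (l[jv.toNat]'hjvN).2.2)]).length
            = C.length := by
          simp only [List.length_append, List.length_dropLast, List.length_cons, List.length_nil]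
          omega
        have hres := ihn (jv + 1) (by omega) (by omega)
          (arr.set (idx - 1).toNat ((C.getLast hCne).1, (C.getLast hCne).2.1, (l[jv.toNat]'hjvN).2.2)) idx
          (by rw [show (jv + 1).toNat = jv.toNat + 1 from by omega, hsnoc, hbr, harr2, hlen2])
          (by rw [show (jv + 1).toNat = jv.toNat + 1 from by omega, hsnoc, hbr, hlen2, hidx])
          (by rw [show (jv + 1).toNat = jv.toNat + 1 from by omega, hsnoc, hbr, hlen2]; omega)
          (by rw [show (jv + 1).toNat = jv.toNat + 1 from by omega, hsnoc, hbr, hlen2]; omega)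
        exact hres
  simp only [pvDedup]
  have hC1 : (l.take ((1 : Int)).toNat).foldl pvRleStep [] = [l[0]'(by omega)] := by
    rw [show ((1 : Int)).toNat = 0 + 1 from rfl, pvTake_concat l 0 (by omega)]
    simp [pvRleStep]
  have happ := main (l.length - 1) 1 (by omega) (by omega) l 1
    (by rw [hC1]
        simp only [List.length_cons, List.length_nil]
        have hcd : l[0]'(by omega) :: l.drop 1 = l := by
          simpa using List.getElem_cons_drop (as := l) (i := 0) (show 0 < l.length by omega)
        rw [List.singleton_append, hcd])
    (by rw [hC1]; simp)
    (by rw [hC1]; simp)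
    (by rw [hC1]; simp)
  rw [happ]
  simp only []
  rw [show (((l.foldl pvRleStep []).length : Int)).toNat = (l.foldl pvRleStep []).length from by omega]
  exact List.take_left' rfl

-- ---------- shape lemmas ----------

theorem pvShape_le : ∀ (ivs : List (Int × Int × Int)) (lo hi : Int), pvShape ivs lo hi → lo ≤ hi := by
  intro ivs
  induction ivs with
  | nil => intro lo hi h; exact le_of_eq h
  | cons p t ih =>
    intro lo hi h
    obtain ⟨-, h2, h3⟩ := h
    have := ih _ _ h3
    omega

theorem pvShape_bounds : ∀ (ivs : List (Int × Int × Int)) (lo hi : Int), pvShape ivs lo hi →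
    ∀ p ∈ ivs, lo ≤ p.2.1 ∧ p.2.1 < p.2.2 ∧ p.2.2 ≤ hi := by
  intro ivs
  induction ivs with
  | nil => intro lo hi _ p hp; simp at hp
  | cons q t ih =>
    intro lo hi h p hp
    obtain ⟨h1, h2, h3⟩ := h
    rcases List.mem_cons.mp hp with rfl | hp'
    · have := pvShape_le _ _ _ h3
      omega
    · have := ih _ _ h3 p hp'
      omega

theorem pvShape_cover : ∀ (ivs : List (Int × Int × Int)) (lo hi : Int), pvShape ivs lo hi →
    ∀ j : Int, lo < j → j ≤ hi → ∃ p ∈ ivs, p.2.1 < j ∧ j ≤ p.2.2 := by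
  intro ivs
  induction ivs with
  | nil =>
    intro lo hi h j h1 h2
    have : lo = hi := h
    omega
  | cons q t ih =>
    intro lo hi h j h1 h2
    obtain ⟨hq1, hq2, hq3⟩ := h
    by_cases hj : j ≤ q.2.2
    · exact ⟨q, by simp, by omega, hj⟩
    · obtain ⟨p, hp, hp1, hp2⟩ := ih _ _ hq3 j (by omega) h2
      exact ⟨p, by simp [hp], hp1, hp2⟩

theorem pvShape_last : ∀ (ivs : List (Int × Int × Int)) (lo hi : Int), pvShape ivs lo hi →
    ∀ q, ivs.getLast? = some q → q.2.2 = hi := by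
  intro ivs
  induction ivs with
  | nil => intro lo hi _ q hq; simp at hq
  | cons p t ih =>
    intro lo hi h q hq
    obtain ⟨-, -, h3⟩ := h
    cases t with
    | nil =>
      simp at hq
      have h4 : p.2.2 = hi := h3
      rw [← hq]
      exact h4
    | cons p' t' =>
      rw [List.getLast?_cons_cons] at hq
      exact ih _ _ h3 q hq

theorem pvShape_dropLast : ∀ (ivs : List (Int × Int × Int)) (lo hi : Int), pvShape ivs lo hi →
    ∀ q, ivs.getLast? = some q → pvShape ivs.dropLast lo q.2.1 := by
  intro ivs
  induction ivs with
  | nil => intro lo hi _ q hq; simp at hq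
  | cons p t ih =>
    intro lo hi h q hq
    obtain ⟨h1, h2, h3⟩ := h
    cases t with
    | nil =>
      simp at hq
      subst hq
      exact h1.symm
    | cons p' t' =>
      rw [List.getLast?_cons_cons] at hq
      have h4 := ih _ _ h3 q hq
      exact ⟨h1, h2, h4⟩

theorem pvShape_append : ∀ (s t : List (Int × Int × Int)) (lo mid hi : Int),
    pvShape s lo mid → pvShape t mid hi → pvShape (s ++ t) lo hi := by
  intro s
  induction s with
  | nil =>
    intro t lo mid hi hs ht
    have : lo = mid := hs
    subst this
    simpa using ht
  | cons p s' ih =>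
    intro t lo mid hi hs ht
    obtain ⟨h1, h2, h3⟩ := hs
    exact ⟨h1, h2, ih _ _ _ _ h3 ht⟩

theorem pvRle_preserves (V : Int → Int) :
    ∀ (l : List (Int × Int × Int)) (mid hi : Int) (acc : List (Int × Int × Int)) (lo : Int),
    pvShape l mid hi → pvShape acc lo mid → pvConstV V acc → pvConstV V l →
    pvShape (l.foldl pvRleStep acc) lo hi ∧ pvConstV V (l.foldl pvRleStep acc) := by
  intro l
  induction l with
  | nil =>
    intro mid hi acc lo hl hacc hCacc _
    have : mid = hi := hl
    subst this
    exact ⟨hacc, hCacc⟩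
  | cons e t ih =>
    intro mid hi acc lo hl hacc hCacc hCl
    obtain ⟨he1, he2, he3⟩ := hl
    simp only [List.foldl_cons]
    have hCt : pvConstV V t := fun p hp => hCl p (by simp [hp])
    have hCe : ∀ j : Int, e.2.1 < j → j ≤ e.2.2 → V j = e.1 := hCl e (by simp)
    have hstep : pvShape (pvRleStep acc e) lo e.2.2 ∧ pvConstV V (pvRleStep acc e) := by
      unfold pvRleStep
      cases hgl : acc.getLast? with
      | none =>
        have hacc0 : acc = [] := List.getLast?_eq_none_iff.mp hgl
        subst hacc0
        have hlm : lo = mid := hacc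
        constructor
        · exact ⟨by rw [he1, hlm], by omega, rfl⟩
        · intro p hp
          simp at hp
          subst hp
          exact hCe
      | some q =>
        have haccne : acc ≠ [] := by
          intro hc; rw [hc] at hgl; simp at hgl
        have hq22 : q.2.2 = mid := pvShape_last _ _ _ hacc q hgl
        have hqmem : q ∈ acc := List.mem_of_getLast? hgl
        have hqb := pvShape_bounds _ _ _ hacc q hqmem
        dsimp only
        split
        · next heq =>
          constructor
          · refine pvShape_append _ _ _ q.2.1 _ (pvShape_dropLast _ _ _ hacc q hgl) ?_
            exact ⟨rfl, show q.2.1 < e.2.2 by omega, rfl⟩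
          · intro p hp
            rcases List.mem_append.mp hp with hp' | hp'
            · exact hCacc p ((List.dropLast_sublist acc).mem hp')
            · simp at hp'
              subst hp'
              intro j hj1 hj2
              simp only at hj1 hj2 ⊢
              by_cases hjq : j ≤ q.2.2
              · exact hCacc q hqmem j hj1 hjq
              · rw [hCe j (by omega) hj2, heq]
        · next hne =>
          constructor
          · exact pvShape_append _ _ _ mid _ hacc ⟨he1, he2, rfl⟩
          · intro p hp
            rcases List.mem_append.mp hp with hp' | hp'
            · exact hCacc p hp'
            · simp at hp'
              subst hp'
              exact hCe
    exact ih _ _ _ _ he3 hstep.1 hstep.2 hCt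

-- ---------- counting lemmas ----------

theorem pvWin_eq_range_map (nums : List Int) (j i : Nat) (hji : j ≤ i) (hi : i < nums.length) :
    pvWin nums j i = (List.range (i + 1 - j)).map (fun t => nums.getD (j + t) 0) := by
  apply List.ext_getElem
  · rw [pvWin_len nums j i hji hi]; simp
  · intro t h1 h2
    simp only [List.getElem_map, List.getElem_range]
    unfold pvWin
    rw [List.getElem_take, List.getElem_drop]
    have hjt : j + t < nums.length := by
      rw [pvWin_len nums j i hji hi] at h1
      omega
    simp [List.getD_eq_getElem?_getD, List.getElem?_eq_getElem hjt]

theorem pvCount_shift (j : Nat) (P : Nat → Bool) :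
    ∀ n : Nat, (List.range (j + n)).countP (fun q => decide (j ≤ q) && P q)
      = (List.range n).countP (fun t => P (j + t)) := by
  intro n
  induction n with
  | zero =>
    simp only [Nat.add_zero, List.range_zero, List.countP_nil]
    rw [List.countP_eq_zero]
    intro q hq
    simp only [List.mem_range] at hq
    simp only [Bool.and_eq_true, decide_eq_true_eq, not_and]
    intro hc
    omega
  | succ n ihn =>
    rw [show j + (n + 1) = (j + n) + 1 by omega, List.range_succ, List.range_succ,
      List.countP_append, List.countP_append, ihn]
    simp

theorem pvCount_win_pos (nums : List Int) (j m : Nat) (b : Int) (hjm : j ≤ m) (hm : m < nums.length) :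
    (pvWin nums j m).countP (pvCrit b)
      = (pvPosL nums (m + 1) b).countP (fun q => decide ((j : Int) ≤ q)) := by
  have hL : (pvWin nums j m).countP (pvCrit b)
      = (List.range (m + 1 - j)).countP (fun t => pvCrit b (nums.getD (j + t) 0)) := by
    rw [pvWin_eq_range_map nums j m hjm hm, List.countP_map]
    rfl
  have hfn : ((fun q : Int => decide ((j : Int) ≤ q)) ∘ (fun q : Nat => (q : Int)))
      = fun q : Nat => decide (j ≤ q) := by
    funext q
    simp [Function.comp_def]
  have hR : (pvPosL nums (m + 1) b).countP (fun q => decide ((j : Int) ≤ q))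
      = (List.range (m + 1)).countP (fun q => decide (j ≤ q) && pvCrit b (nums.getD q 0)) := by
    unfold pvPosL
    rw [List.countP_map, hfn, List.countP_filter]
  rw [hL, hR]
  have hsh := pvCount_shift j (fun q => pvCrit b (nums.getD q 0)) (m + 1 - j)
  rw [show j + (m + 1 - j) = m + 1 from by omega] at hsh
  rw [hsh]

theorem pvPosL_sorted (nums : List Int) (m : Nat) (b : Int) :
    (pvPosL nums m b).Pairwise (· < ·) := by
  unfold pvPosL
  refine List.pairwise_map.mpr ?_
  refine List.Pairwise.imp ?_ ((List.pairwise_lt_range).filter _)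
  intro a b hab
  exact_mod_cast hab

theorem pvSorted_count_le_iff (s : List Int) (hs : s.Pairwise (· < ·)) (t : Nat)
    (ht : t < s.length) (j : Int) :
    (s.countP (fun q => decide (j ≤ q)) ≤ s.length - 1 - t) ↔ s[t] < j := by
  have hsplit : s = s.take t ++ s[t] :: s.drop (t + 1) := by
    conv_lhs => rw [← List.take_append_drop t s, List.drop_eq_getElem_cons ht]
  have hpre : ∀ a ∈ s.take t, a < s[t] := by
    intro a ha
    obtain ⟨u, hu, hv⟩ := List.mem_take_iff_getElem.mp ha
    rw [← hv]
    exact List.pairwise_iff_getElem.mp hs u t (by omega) ht (by omega)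
  have hsuf : ∀ a ∈ s.drop (t + 1), s[t] < a := by
    intro a ha
    obtain ⟨u, hu, hv⟩ := List.mem_drop_iff_getElem.mp ha
    rw [← hv]
    exact List.pairwise_iff_getElem.mp hs t (t + 1 + u) ht (by omega) (by omega)
  have hval : s.countP (fun q => decide (j ≤ q))
      = (s.take t).countP (fun q => decide (j ≤ q))
        + ((s.drop (t + 1)).countP (fun q => decide (j ≤ q))
           + if decide (j ≤ s[t]) = true then 1 else 0) := by
    conv_lhs => rw [hsplit]
    rw [List.countP_append, List.countP_cons]
  have hlen1 : (s.take t).length = t := by simp; omega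
  have hlen2 : (s.drop (t + 1)).length = s.length - t - 1 := by
    rw [List.length_drop]
    omega
  constructor
  · intro h
    by_contra hc
    push_neg at hc
    have h1 : (s.drop (t + 1)).countP (fun q => decide (j ≤ q)) = (s.drop (t + 1)).length := by
      rw [List.countP_eq_length]
      intro a ha
      have := hsuf a ha
      simp only [decide_eq_true_eq]
      omega
    have hd1 : (if decide (j ≤ s[t]) = true then 1 else 0) = 1 := by simp [hc]
    rw [hval, h1, hd1, hlen2] at h
    omega
  · intro h
    have h1 : (s.take t).countP (fun q => decide (j ≤ q)) = 0 := by
      rw [List.countP_eq_zero]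
      intro a ha
      have := hpre a ha
      simp only [decide_eq_true_eq]
      omega
    have h2 : (s.drop (t + 1)).countP (fun q => decide (j ≤ q)) ≤ (s.drop (t + 1)).length :=
      List.countP_le_length
    have hd1 : (if decide (j ≤ s[t]) = true then 1 else 0) = 0 := by
      simp only [decide_eq_true_eq]
      rw [if_neg (by omega)]
    rw [hval, h1, hd1]
    rw [hlen2] at h2
    omega

-- ---------- A's per-interval candidates vs window scores ----------

def pvMinl (k : Int) (d : PySem.Dict Int (List Int)) (g l : Int) : Int :=
  if ((d.getD (pvLowbit g) []).length : Int) > k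
  then max l ((PySem.List.pyGet? (d.getD (pvLowbit g) []) (-k - 1)).getD 0) else l

def pvAnsStep (k i : Int) (d : PySem.Dict Int (List Int)) (a : Int) (p : Int × Int × Int) : Int :=
  let a := max a (p.1 * (i - p.2.1))
  let pos := d.getD (pvLowbit p.1) []
  let min_l := if (pos.length : Int) > k then max p.2.1 ((PySem.List.pyGet? pos (-k - 1)).getD 0) else p.2.1
  if min_l < p.2.2 then max a (p.1 * 2 * (i - min_l)) else a

theorem pvAnsStep_eq (k i : Int) (d : PySem.Dict Int (List Int)) (a : Int) (p : Int × Int × Int) :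
    pvAnsStep k i d a p =
      if pvMinl k d p.1 p.2.1 < p.2.2
      then max (max a (p.1 * (i - p.2.1))) (p.1 * 2 * (i - pvMinl k d p.1 p.2.1))
      else max a (p.1 * (i - p.2.1)) := rfl

theorem pvAnsFold_mono (k i : Int) (d : PySem.Dict Int (List Int)) :
    ∀ (ivs : List (Int × Int × Int)) (a : Int), a ≤ ivs.foldl (pvAnsStep k i d) a := by
  intro ivs
  induction ivs with
  | nil => intro a; simp
  | cons p t ih =>
    intro a
    refine le_trans ?_ (ih (pvAnsStep k i d a p))
    rw [pvAnsStep_eq]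
    split <;> simp

theorem pvAnsFold_ge (k i : Int) (d : PySem.Dict Int (List Int)) :
    ∀ (ivs : List (Int × Int × Int)) (a : Int) (p : Int × Int × Int), p ∈ ivs →
      p.1 * (i - p.2.1) ≤ ivs.foldl (pvAnsStep k i d) a ∧
      (pvMinl k d p.1 p.2.1 < p.2.2 →
        p.1 * 2 * (i - pvMinl k d p.1 p.2.1) ≤ ivs.foldl (pvAnsStep k i d) a) := by
  intro ivs
  induction ivs with
  | nil => intro a p hp; simp at hp
  | cons q t ih =>
    intro a p hp
    rcases List.mem_cons.mp hp with rfl | hp'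
    · constructor
      · refine le_trans ?_ (pvAnsFold_mono k i d t (pvAnsStep k i d a p))
        rw [pvAnsStep_eq]
        split <;> simp
      · intro hgd
        refine le_trans ?_ (pvAnsFold_mono k i d t (pvAnsStep k i d a p))
        rw [pvAnsStep_eq, if_pos hgd]
        simp
    · exact ih (pvAnsStep k i d a q) p hp'

theorem pvAnsFold_le (k i : Int) (d : PySem.Dict Int (List Int)) (r : Int) :
    ∀ (ivs : List (Int × Int × Int)) (a : Int), a ≤ r →
      (∀ p ∈ ivs, p.1 * (i - p.2.1) ≤ r ∧
        (pvMinl k d p.1 p.2.1 < p.2.2 → p.1 * 2 * (i - pvMinl k d p.1 p.2.1) ≤ r)) →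
      ivs.foldl (pvAnsStep k i d) a ≤ r := by
  intro ivs
  induction ivs with
  | nil => intro a ha _; simpa using ha
  | cons p t ih =>
    intro a ha hall
    simp only [List.foldl_cons]
    refine ih _ ?_ (fun q hq => hall q (by simp [hq]))
    have hp := hall p (by simp)
    rw [pvAnsStep_eq]
    split
    · next hgd =>
      simp only [max_le_iff]
      exact ⟨⟨ha, hp.1⟩, hp.2 hgd⟩
    · simp only [max_le_iff]
      exact ⟨ha, hp.1⟩

-- per-run analysis of A's update against window scores
theorem pvRun_main (nums : List Int) (k : Int) (hk : 0 ≤ k) (m : Nat) (hm : m < nums.length)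
    (d : PySem.Dict Int (List Int)) (hd : ∀ b, d.getD b [] = pvPosL nums (m + 1) b)
    (g l rr : Int) (hlo : -1 ≤ l) (hlr : l < rr) (hhi : rr ≤ (m : Int))
    (hg : ∀ j : Int, l < j → j ≤ rr → pvGOf (pvWin nums j.toNat m) = g) :
    (∀ r : Int, pvUB nums k r →
       g * ((m : Int) - l) ≤ r ∧
       (pvMinl k d g l < rr → g * 2 * ((m : Int) - pvMinl k d g l) ≤ r))
    ∧ (∀ j : Int, l < j → j ≤ rr →
         pvScore nums k j.toNat m ≤ 0 ∨
         pvScore nums k j.toNat m ≤ g * ((m : Int) - l) ∨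
         (pvMinl k d g l < rr ∧ pvScore nums k j.toNat m ≤ g * 2 * ((m : Int) - pvMinl k d g l))) := by
  set P := d.getD (pvLowbit g) [] with hPdef
  have hP : P = pvPosL nums (m + 1) (pvLowbit g) := hd _
  have hsorted : P.Pairwise (· < ·) := by
    rw [hP]; exact pvPosL_sorted nums (m + 1) (pvLowbit g)
  have hscore : ∀ j : Int, l < j → j ≤ rr →
      pvScore nums k j.toNat m =
        if (P.countP (fun q => decide (j ≤ q)) : Int) ≤ k
        then (g * ((m : Int) - j + 1)) * 2 else g * ((m : Int) - j + 1) := by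
    intro j hj1 hj2
    have hj0 : 0 ≤ j := by omega
    have hjN : j.toNat ≤ m := by omega
    unfold pvScore pvScoreW
    rw [hg j hj1 hj2]
    rw [pvCount_win_pos nums j.toNat m (pvLowbit g) hjN hm, ← hP]
    rw [pvWin_len nums j.toNat m hjN hm]
    rw [show ((j.toNat : Int)) = j from by omega]
    rw [show (((m + 1 - j.toNat : Nat)) : Int) = (m : Int) - j + 1 from by omega]
  by_cases hbig : ((P.length : Int) > k)
  · -- len(pos) > k
    have hkN : k.toNat < P.length := by omega
    have ht : P.length - 1 - k.toNat < P.length := by omega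
    have hpg : PySem.List.pyGet? P (-k - 1) = some (P[P.length - 1 - k.toNat]'ht) := by
      have h1 : (-k - 1) = -(((k.toNat + 1 : Nat)) : Int) := by push_cast; omega
      rw [h1, PySem.List.pyGet?_neg_natCast P (k.toNat + 1) (by omega) (by omega)]
      rw [show P.length - (k.toNat + 1) = P.length - 1 - k.toNat from by omega]
      exact List.getElem?_eq_getElem ht
    have hminl : pvMinl k d g l = max l (P[P.length - 1 - k.toNat]'ht) := by
      unfold pvMinl
      rw [← hPdef, if_pos hbig, hpg]
      rfl
    have hiff : ∀ j : Int,
        ((P.countP (fun q => decide (j ≤ q)) : Int) ≤ k ↔ (P[P.length - 1 - k.toNat]'ht) < j) := by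
      intro j
      have hx := pvSorted_count_le_iff P hsorted (P.length - 1 - k.toNat) ht j
      rw [show P.length - 1 - (P.length - 1 - k.toNat) = k.toNat from by omega] at hx
      constructor
      · intro hc; exact hx.mp (by omega)
      · intro hc; have := hx.mpr hc; omega
    constructor
    · intro r hr
      obtain ⟨hr0, hrs⟩ := hr
      by_cases hgpos : 0 < g
      · constructor
        · have hub := hrs (l + 1).toNat m (by omega) hm
          rw [hscore (l + 1) (by omega) (by omega)] at hub
          rw [show (m : Int) - (l + 1) + 1 = (m : Int) - l from by ring] at hub
          have hnn : 0 ≤ g * ((m : Int) - l) := mul_nonneg (le_of_lt hgpos) (by omega)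
          split_ifs at hub with hcond
          · linarith
          · exact hub
        · intro hgd
          have hlml : l ≤ pvMinl k d g l := by rw [hminl]; exact le_max_left _ _
          have hPtml : (P[P.length - 1 - k.toNat]'ht) ≤ pvMinl k d g l := by
            rw [hminl]; exact le_max_right _ _
          have hcnt : (P.countP (fun q => decide ((pvMinl k d g l + 1) ≤ q)) : Int) ≤ k :=
            (hiff _).mpr (by omega)
          have hub := hrs (pvMinl k d g l + 1).toNat m (by omega) hm
          rw [hscore (pvMinl k d g l + 1) (by omega) (by omega), if_pos hcnt] at hub
          calc g * 2 * ((m : Int) - pvMinl k d g l)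
              = (g * ((m : Int) - (pvMinl k d g l + 1) + 1)) * 2 := by ring
            _ ≤ r := hub
      · push_neg at hgpos
        constructor
        · have h1 : g * ((m : Int) - l) ≤ 0 := mul_nonpos_of_nonpos_of_nonneg hgpos (by omega)
          linarith
        · intro hgd
          have hml : l ≤ pvMinl k d g l := by rw [hminl]; exact le_max_left _ _
          have h1 : g * 2 * ((m : Int) - pvMinl k d g l) ≤ 0 :=
            mul_nonpos_of_nonpos_of_nonneg (by linarith) (by omega)
          linarith
    · intro j hj1 hj2
      have hs := hscore j hj1 hj2
      by_cases hgpos : 0 < g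
      · by_cases hcnt : (P.countP (fun q => decide (j ≤ q)) : Int) ≤ k
        · right; right
          have hPt : (P[P.length - 1 - k.toNat]'ht) < j := (hiff j).mp hcnt
          have hml : pvMinl k d g l ≤ j - 1 := by
            rw [hminl]; apply max_le <;> omega
          refine ⟨by omega, ?_⟩
          rw [hs, if_pos hcnt]
          have h1 : (m : Int) - j + 1 ≤ (m : Int) - pvMinl k d g l := by omega
          nlinarith
        · right; left
          rw [hs, if_neg hcnt]
          have h1 : (m : Int) - j + 1 ≤ (m : Int) - l := by omega
          nlinarith
      · left
        push_neg at hgpos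
        rw [hs]
        split_ifs
        · have h1 : g * ((m : Int) - j + 1) ≤ 0 :=
            mul_nonpos_of_nonpos_of_nonneg hgpos (by omega)
          linarith
        · exact mul_nonpos_of_nonpos_of_nonneg hgpos (by omega)
  · -- len(pos) ≤ k: doubling always allowed
    push_neg at hbig
    have hminl : pvMinl k d g l = l := by
      unfold pvMinl
      rw [← hPdef, if_neg (by omega)]
    have hcnt_all : ∀ j : Int, (P.countP (fun q => decide (j ≤ q)) : Int) ≤ k := by
      intro j
      have h1 : P.countP (fun q => decide (j ≤ q)) ≤ P.length := List.countP_le_length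
      omega
    constructor
    · intro r hr
      obtain ⟨hr0, hrs⟩ := hr
      by_cases hgpos : 0 < g
      · have hub := hrs (l + 1).toNat m (by omega) hm
        rw [hscore (l + 1) (by omega) (by omega), if_pos (hcnt_all _)] at hub
        rw [show (m : Int) - (l + 1) + 1 = (m : Int) - l from by ring] at hub
        have hnn : 0 ≤ g * ((m : Int) - l) := mul_nonneg (le_of_lt hgpos) (by omega)
        constructor
        · linarith
        · intro _
          rw [hminl]
          calc g * 2 * ((m : Int) - l) = (g * ((m : Int) - l)) * 2 := by ring
            _ ≤ r := hub
      · push_neg at hgpos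
        constructor
        · have h1 : g * ((m : Int) - l) ≤ 0 := mul_nonpos_of_nonpos_of_nonneg hgpos (by omega)
          linarith
        · intro _
          rw [hminl]
          have h1 : g * 2 * ((m : Int) - l) ≤ 0 :=
            mul_nonpos_of_nonpos_of_nonneg (by linarith) (by omega)
          linarith
    · intro j hj1 hj2
      by_cases hgpos : 0 < g
      · right; right
        refine ⟨by rw [hminl]; omega, ?_⟩
        rw [hscore j hj1 hj2, if_pos (hcnt_all _), hminl]
        have h1 : (m : Int) - j + 1 ≤ (m : Int) - l := by omega
        nlinarith
      · left
        push_neg at hgpos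
        rw [hscore j hj1 hj2]
        split_ifs
        · have h1 : g * ((m : Int) - j + 1) ≤ 0 :=
            mul_nonpos_of_nonpos_of_nonneg hgpos (by omega)
          linarith
        · exact mul_nonpos_of_nonpos_of_nonneg hgpos (by omega)

-- dict invariant through one insertion
theorem pvPosL_succ (nums : List Int) (m : Nat) (b : Int) :
    pvPosL nums (m + 1) b
      = pvPosL nums m b ++ (if pvCrit b (nums.getD m 0) then [(m : Int)] else []) := by
  unfold pvPosL
  rw [List.range_succ, List.filter_append, List.map_append]
  congr 1
  by_cases hc : pvCrit b (nums.getD m 0)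
  · simp only [List.getD_eq_getElem?_getD] at hc
    simp [hc]
  · simp only [List.getD_eq_getElem?_getD] at hc
    simp [hc]

theorem pvDict_step (nums : List Int) (m : Nat) (d : PySem.Dict Int (List Int))
    (hd : ∀ b, d.getD b [] = pvPosL nums m b) :
    ∀ b, (d.insert (pvLowbit (nums.getD m 0))
            (d.getD (pvLowbit (nums.getD m 0)) [] ++ [(m : Int)])).getD b []
        = pvPosL nums (m + 1) b := by
  intro b
  rw [PySem.Dict.getD_insert, pvPosL_succ]
  by_cases hb : b = pvLowbit (nums.getD m 0)
  · rw [if_pos hb, hd]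
    have hc : pvCrit b (nums.getD m 0) = true := by simp [pvCrit, hb]
    rw [hc, hb]
    simp
  · rw [if_neg hb, hd]
    have hc : pvCrit b (nums.getD m 0) = false := by
      simp only [pvCrit, beq_eq_false_iff_ne, ne_eq]
      exact fun hcc => hb hcc.symm
    rw [hc]
    simp

-- map preserves shape
theorem pvShape_map (f : Int → Int) :
    ∀ (ivs : List (Int × Int × Int)) (lo hi : Int), pvShape ivs lo hi →
    pvShape (ivs.map (fun p => (f p.1, p.2.1, p.2.2))) lo hi := by
  intro ivs
  induction ivs with
  | nil => intro lo hi h; exact h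
  | cons p t ih =>
    intro lo hi h
    obtain ⟨h1, h2, h3⟩ := h
    exact ⟨h1, h2, ih _ _ h3⟩

-- ---------- A's master invariant ----------

def pvAInv (nums : List Int) (k : Int) (m : Nat)
    (st : PySem.Dict Int (List Int) × Int × List (Int × Int × Int)) : Prop :=
  (∀ b, st.1.getD b [] = pvPosL nums m b)
  ∧ pvShape st.2.2 (-1) ((m : Int) - 1)
  ∧ pvConstV (fun j => pvGOf (pvWin nums j.toNat (m - 1))) st.2.2
  ∧ 0 ≤ st.2.1
  ∧ (∀ j i : Nat, j ≤ i → i < m → pvScore nums k j i ≤ st.2.1)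
  ∧ (∀ r, pvUB nums k r → st.2.1 ≤ r)

theorem pvStepA_inv (nums : List Int) (k : Int) (hk : 0 ≤ k) (m : Nat) (hm : m < nums.length)
    (st : PySem.Dict Int (List Int) × Int × List (Int × Int × Int))
    (h : pvAInv nums k m st) :
    pvAInv nums k (m + 1) (pvStepA k st ((m : Int), nums.getD m 0)) := by
  obtain ⟨hd, hsh, hcv, h0, hge, hle⟩ := h
  have hstepeq : pvStepA k st ((m : Int), nums.getD m 0)
      = (st.1.insert (pvLowbit (nums.getD m 0)) (st.1.getD (pvLowbit (nums.getD m 0)) [] ++ [(m : Int)]),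
         (pvDedup (st.2.2.map (fun p => (pvGcd p.1 (nums.getD m 0), p.2.1, p.2.2))
             ++ [(nums.getD m 0, (m : Int) - 1, (m : Int))])).foldl
           (pvAnsStep k (m : Int)
             (st.1.insert (pvLowbit (nums.getD m 0)) (st.1.getD (pvLowbit (nums.getD m 0)) [] ++ [(m : Int)])))
           st.2.1,
         pvDedup (st.2.2.map (fun p => (pvGcd p.1 (nums.getD m 0), p.2.1, p.2.2))
             ++ [(nums.getD m 0, (m : Int) - 1, (m : Int))])) := rfl
  rw [hstepeq]
  set d' := st.1.insert (pvLowbit (nums.getD m 0))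
    (st.1.getD (pvLowbit (nums.getD m 0)) [] ++ [(m : Int)]) with hd'def
  set ivs2 := st.2.2.map (fun p => (pvGcd p.1 (nums.getD m 0), p.2.1, p.2.2))
    ++ [(nums.getD m 0, (m : Int) - 1, (m : Int))] with hivs2def
  set ivs3 := pvDedup ivs2 with hivs3def
  have hdict : ∀ b, d'.getD b [] = pvPosL nums (m + 1) b := pvDict_step nums m st.1 hd
  -- shape and constancy of the new interval list
  have hVmap : pvConstV (fun j => pvGOf (pvWin nums j.toNat m))
      (st.2.2.map (fun p => (pvGcd p.1 (nums.getD m 0), p.2.1, p.2.2))) := by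
    intro p' hp'
    obtain ⟨p, hp, rfl⟩ := List.mem_map.mp hp'
    intro j hj1 hj2
    simp only at hj1 hj2 ⊢
    obtain ⟨hb1, hb2, hb3⟩ := pvShape_bounds _ _ _ hsh p hp
    have hj0 : 0 ≤ j := by omega
    have hm1 : 1 ≤ m := by omega
    have hjN : j.toNat ≤ m - 1 := by omega
    have hwin := pvWin_succ nums j.toNat (m - 1) hjN (by omega)
    rw [show m - 1 + 1 = m from by omega] at hwin
    rw [hwin, pvGOf_append _ _ (pvWin_ne_nil nums j.toNat (m - 1) hjN (by omega))]
    rw [show pvGOf (pvWin nums j.toNat (m - 1)) = p.1 from hcv p hp j hj1 hj2]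
  have hVsingle : pvConstV (fun j => pvGOf (pvWin nums j.toNat m))
      [(nums.getD m 0, (m : Int) - 1, (m : Int))] := by
    intro p hp j hj1 hj2
    simp only [List.mem_singleton] at hp
    subst hp
    simp only at hj1 hj2 ⊢
    have hj : j = (m : Int) := by omega
    subst hj
    rw [show ((m : Int)).toNat = m from by omega, pvWin_single nums m hm]
    rfl
  have hCV2 : pvConstV (fun j => pvGOf (pvWin nums j.toNat m)) ivs2 := by
    intro p hp
    rcases List.mem_append.mp hp with hp' | hp'
    · exact hVmap p hp'
    · exact hVsingle p hp'
  have hsh2 : pvShape ivs2 (-1) ((m : Int)) := by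
    refine pvShape_append _ _ _ ((m : Int) - 1) _ ?_ ?_
    · exact pvShape_map (fun gg => pvGcd gg (nums.getD m 0)) _ _ _ hsh
    · exact ⟨rfl, show (m : Int) - 1 < (m : Int) by omega, rfl⟩
  have hpres := pvRle_preserves (fun j => pvGOf (pvWin nums j.toNat m)) ivs2 (-1) ((m : Int))
    [] (-1) hsh2 rfl (by intro p hp; simp at hp) hCV2
  have hsh3 : pvShape ivs3 (-1) ((m : Int)) := by
    rw [hivs3def, pvDedup_eq_rle]; exact hpres.1
  have hcv3 : pvConstV (fun j => pvGOf (pvWin nums j.toNat m)) ivs3 := by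
    rw [hivs3def, pvDedup_eq_rle]; exact hpres.2
  refine ⟨hdict, ?_, ?_, ?_, ?_, ?_⟩
  · show pvShape ivs3 (-1) (((m + 1 : Nat) : Int) - 1)
    rw [show (((m + 1 : Nat)) : Int) - 1 = ((m : Int)) from by push_cast; ring]
    exact hsh3
  · show pvConstV (fun j => pvGOf (pvWin nums j.toNat (m + 1 - 1))) ivs3
    rw [show m + 1 - 1 = m from by omega]
    exact hcv3
  · exact le_trans h0 (pvAnsFold_mono _ _ _ _ _)
  · intro j i hji hi
    by_cases hi' : i < m
    · exact le_trans (hge j i hji hi') (pvAnsFold_mono _ _ _ _ _)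
    · have him : i = m := by omega
      rw [him] at hji ⊢
      obtain ⟨p, hp, hcov1, hcov2⟩ := pvShape_cover ivs3 (-1) ((m : Int)) hsh3 (j : Int)
        (by omega) (by omega)
      obtain ⟨hb1, hb2, hb3⟩ := pvShape_bounds _ _ _ hsh3 p hp
      have hgc : ∀ jj : Int, p.2.1 < jj → jj ≤ p.2.2 → pvGOf (pvWin nums jj.toNat m) = p.1 :=
        fun jj h1 h2 => hcv3 p hp jj h1 h2
      have hrm := pvRun_main nums k hk m hm d' hdict p.1 p.2.1 p.2.2 hb1 hb2 hb3 hgc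
      have h2 := hrm.2 (j : Int) hcov1 hcov2
      rw [show ((j : Int)).toNat = j from by omega] at h2
      have hAns := pvAnsFold_ge k (m : Int) d' ivs3 st.2.1 p hp
      rcases h2 with h2 | h2 | ⟨hgd, h2⟩
      · exact le_trans h2 (le_trans h0 (pvAnsFold_mono _ _ _ _ _))
      · exact le_trans h2 hAns.1
      · exact le_trans h2 (hAns.2 hgd)
  · intro r hr
    refine pvAnsFold_le k (m : Int) d' r ivs3 st.2.1 (hle r hr) ?_
    intro p hp
    obtain ⟨hb1, hb2, hb3⟩ := pvShape_bounds _ _ _ hsh3 p hp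
    have hgc : ∀ jj : Int, p.2.1 < jj → jj ≤ p.2.2 → pvGOf (pvWin nums jj.toNat m) = p.1 :=
      fun jj h1 h2 => hcv3 p hp jj h1 h2
    exact (pvRun_main nums k hk m hm d' hdict p.1 p.2.1 p.2.2 hb1 hb2 hb3 hgc).1 r hr

theorem pvA_run (nums : List Int) (k : Int) (hk : 0 ≤ k) :
    ∀ (l : List Int) (m : Nat) st, nums.drop m = l → pvAInv nums k m st →
    pvAInv nums k (m + l.length) ((PySem.List.enumerate l (m : Int)).foldl (pvStepA k) st) := by
  intro l
  induction l with
  | nil => intro m st _ h; simpa using h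
  | cons x t ih =>
    intro m st hdrop h
    have hm : m < nums.length := by
      have := congrArg List.length hdrop
      simp [List.length_drop] at this
      omega
    have hx : nums.getD m 0 = x := by
      have h0 : nums[m]? = some x := by
        have h1 : (nums.drop m)[0]? = some x := by rw [hdrop]; simp
        rwa [List.getElem?_drop, Nat.add_zero] at h1
      simp [List.getD_eq_getElem?_getD, h0]
    have ht : nums.drop (m + 1) = t := by
      have h1 := congrArg List.tail hdrop
      simpa [List.tail_drop] using h1
    rw [PySem.List.enumerate_cons]
    simp only [List.foldl_cons]
    have hstep := pvStepA_inv nums k hk m hm st h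
    rw [hx] at hstep
    have hres := ih (m + 1) _ ht hstep
    simp only [List.length_cons]
    rw [show m + (t.length + 1) = (m + 1) + t.length from by omega]
    rw [show ((m : Int) + 1) = (((m + 1 : Nat)) : Int) from by push_cast; ring]
    exact hres

theorem pvA_inv (nums : List Int) (k : Int) (hk : 0 ≤ k) :
    pvAInv nums k nums.length
      ((PySem.List.enumerate nums 0).foldl (pvStepA k) (PySem.Dict.empty, 0, [])) := by
  have h0 : pvAInv nums k 0 (PySem.Dict.empty, 0, []) := by
    refine ⟨?_, ?_, ?_, le_refl _, ?_, ?_⟩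
    · intro b
      simp [PySem.Dict.getD_empty, pvPosL]
    · rfl
    · intro p hp; simp at hp
    · intro j i _ hi; omega
    · intro r hr; exact hr.1
  have hres := pvA_run nums k hk nums 0 (PySem.Dict.empty, 0, []) (by simp) h0
  simpa using hres

-- ===== VERDICT (by name: the statement is the Claim_ definition above) =====
theorem maxGCDScore_spec : Claim_equal_maxGCDScore := by
  intro nums k _ hk
  unfold Pre_maxGCDScore at hk
  unfold Spec_maxGCDScore
  obtain ⟨-, -, -, hA0, hAge, hAle⟩ := pvA_inv nums k hk
  have hB := pvB_bound nums k
  refine le_antisymm (hAle _ hB) ?_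
  exact pvB_least nums k _ ⟨hA0, fun j i hji hi => hAge j i hji hi⟩
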